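-- pv_equiv track=rewrite | github.com/dominictarro/WoW-Trader | algorithm/utils.py | scomp
-- ===== SOURCE A (Python) =====
-- def scomp(target, array, delimiter='-'):
-- 	target = f"{delimiter}".join(target.split(delimiter)[:-1])
-- 	if target in array:
-- 		i = array.index(target)
-- 		return array[i]
-- 	elif target == "":
-- 		return ""
-- 	else:
-- 		return scomp(target, array, delimiter=delimiter)
-- ===== SOURCE B (Python) =====
-- def scomp(target, array, delimiter='-'):
--     parts = target.split(delimiter)
--     for k in range(len(parts) - 1, 0, -1):
--         cand = delimiter.join(parts[:k])
--         if cand in array: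
--             return cand
--     return ""
-- ===== Notes on version B (the rewrite author's own statement) =====
-- stated objective: simpler
-- what changed: A recursively re-splits and re-joins the shrinking string at every step; B splits once and runs a single loop over decreasing prefix lengths of the parts list, returning the first prefix join found in the array (the empty-string branch collapses into the loop's natural exhaustion).
import Mathlib
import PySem

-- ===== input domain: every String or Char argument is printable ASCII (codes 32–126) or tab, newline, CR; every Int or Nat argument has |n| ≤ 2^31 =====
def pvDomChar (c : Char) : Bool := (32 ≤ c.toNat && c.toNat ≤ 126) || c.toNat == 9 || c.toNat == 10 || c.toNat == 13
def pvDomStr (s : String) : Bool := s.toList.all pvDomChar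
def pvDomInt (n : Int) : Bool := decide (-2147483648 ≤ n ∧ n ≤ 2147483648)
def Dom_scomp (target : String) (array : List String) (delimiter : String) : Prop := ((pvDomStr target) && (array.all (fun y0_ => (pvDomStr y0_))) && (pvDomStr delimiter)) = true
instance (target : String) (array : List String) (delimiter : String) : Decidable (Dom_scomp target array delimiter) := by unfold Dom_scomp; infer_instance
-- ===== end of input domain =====

-- B replaces A's recursion (which re-splits and re-joins the shrinking string at every step)
-- by a single split and one loop over decreasing prefix lengths; objective: simpler.


-- ===== PORT A =====
-- The helper definitions/lemmas before `goA` exist only because goA's termination proof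
-- (decreasing_by) cites `strip_lt`; they are a reference model of str.split, not part of the port.

-- clean reference model of Python's str.split for a nonempty separator
def sp (sep : List Char) : List Char → List (List Char)
  | [] => [[]]
  | c :: rest =>
    if sep.isPrefixOf (c :: rest) ∧ sep ≠ [] then
      [] :: sp sep ((c :: rest).drop sep.length)
    else (sp sep rest).modifyHead (c :: ·)
termination_by l => l.length
decreasing_by
  · rename_i h
    have : 0 < sep.length := List.length_pos_iff.mpr h.2
    simp [List.length_drop]; omega
  · simp

theorem sp_nil (sep : List Char) : sp sep [] = [[]] := by simp [sp]

theorem sp_cons_pos (sep : List Char) (c : Char) (rest : List Char)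
    (hp : sep.isPrefixOf (c :: rest)) (hsep : sep ≠ []) :
    sp sep (c :: rest) = [] :: sp sep ((c :: rest).drop sep.length) := by
  have hcond : (sep.isPrefixOf (c :: rest) = true) ∧ sep ≠ [] := ⟨hp, hsep⟩
  simp only [sp, if_pos hcond]

theorem sp_cons_neg (sep : List Char) (c : Char) (rest : List Char)
    (h : ¬(sep.isPrefixOf (c :: rest) = true ∧ sep ≠ [])) :
    sp sep (c :: rest) = (sp sep rest).modifyHead (c :: ·) := by
  simp only [sp, if_neg h]

theorem sp_ne_nil (sep l : List Char) : sp sep l ≠ [] := by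
  induction l using sp.induct sep with
  | case1 => simp [sp_nil]
  | case2 c rest h ih => rw [sp_cons_pos sep c rest h.1 h.2]; simp
  | case3 c rest h ih =>
    rw [sp_cons_neg sep c rest h]
    cases hq : sp sep rest with
    | nil => exact absurd hq ih
    | cons q qs => simp

theorem join_modifyHead (sep : List Char) (c : Char) (ps : List (List Char)) (h : ps ≠ []) :
    PySem.Chars.join sep (ps.modifyHead (c :: ·)) = c :: PySem.Chars.join sep ps := by
  cases ps with
  | nil => exact absurd rfl h
  | cons q qs =>
    cases qs with
    | nil => simp [PySem.Chars.join_singleton, List.modifyHead]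
    | cons q' qs' =>
      simp only [List.modifyHead]
      rw [PySem.Chars.join_cons_cons, PySem.Chars.join_cons_cons]
      simp

theorem intercalate_sp (sep : List Char) (hsep : sep ≠ []) (l : List Char) :
    PySem.Chars.join sep (sp sep l) = l := by
  induction l using sp.induct sep with
  | case1 => simp [sp_nil, PySem.Chars.join_singleton]
  | case2 c rest h ih =>
    rw [sp_cons_pos sep c rest h.1 h.2]
    cases hq : sp sep ((c :: rest).drop sep.length) with
    | nil => exact absurd hq (sp_ne_nil _ _)
    | cons q qs =>
      rw [PySem.Chars.join_cons_cons]
      rw [hq] at ih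
      rw [ih]
      have hpre : sep <+: (c :: rest) := List.isPrefixOf_iff_prefix.mp h.1
      obtain ⟨t, ht⟩ := hpre
      rw [← ht]; simp
  | case3 c rest h ih =>
    rw [sp_cons_neg sep c rest h]
    rw [join_modifyHead sep c _ (sp_ne_nil _ _), ih]

theorem join_append_last (sep : List Char) (d : List (List Char)) (x : List Char) (hd : d ≠ []) :
    PySem.Chars.join sep (d ++ [x]) = PySem.Chars.join sep d ++ sep ++ x := by
  induction d with
  | nil => exact absurd rfl hd
  | cons q qs ih =>
    cases qs with
    | nil => simp [PySem.Chars.join_cons_cons, PySem.Chars.join_singleton]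
    | cons q' qs' =>
      rw [show (q :: q' :: qs') ++ [x] = q :: q' :: (qs' ++ [x]) by simp,
        PySem.Chars.join_cons_cons]
      have hih := ih (by simp)
      rw [show (q' :: qs') ++ [x] = q' :: (qs' ++ [x]) by simp] at hih
      rw [hih, PySem.Chars.join_cons_cons]
      simp

-- splitOn's fuelled worker computes sp (up to the accumulators)
theorem go_spec (sep : List Char) (hsep : sep ≠ []) :
    ∀ (fuel : Nat) (l cur : List Char) (acc : List (List Char)), l.length < fuel →
      PySem.Chars.splitOn.go sep fuel l cur acc =
        acc.reverse ++ (sp sep l).modifyHead (cur.reverse ++ ·) := by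
  intro fuel
  induction fuel with
  | zero => intro l cur acc h; omega
  | succ fuel ih =>
    intro l cur acc h
    cases l with
    | nil =>
      simp [PySem.Chars.splitOn.go, sp_nil, List.modifyHead]
    | cons c rest =>
      by_cases hp : sep.isPrefixOf (c :: rest)
      · have hlen : 0 < sep.length := List.length_pos_iff.mpr hsep
        rw [show PySem.Chars.splitOn.go sep (fuel+1) (c :: rest) cur acc =
            PySem.Chars.splitOn.go sep fuel ((c :: rest).drop sep.length) []
              (cur.reverse :: acc) by
          conv_lhs => rw [PySem.Chars.splitOn.go]
          simp [hp]]
        rw [ih _ _ _ (by simp [List.length_drop]; simp at h; omega)]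
        rw [sp_cons_pos sep c rest hp hsep]
        cases hq : sp sep ((c :: rest).drop sep.length) with
        | nil => exact absurd hq (sp_ne_nil _ _)
        | cons q qs => simp [List.modifyHead]
      · rw [show PySem.Chars.splitOn.go sep (fuel+1) (c :: rest) cur acc =
            PySem.Chars.splitOn.go sep fuel rest (c :: cur) acc by
          conv_lhs => rw [PySem.Chars.splitOn.go]
          simp [hp]]
        rw [ih _ _ _ (by simp at h ⊢; omega)]
        rw [sp_cons_neg sep c rest (by tauto)]
        cases hq : sp sep rest with
        | nil => exact absurd hq (sp_ne_nil _ _)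
        | cons q qs => simp [List.modifyHead]

theorem splitOn_eq_sp (sep l : List Char) (hsep : sep ≠ []) :
    PySem.Chars.splitOn l sep = sp sep l := by
  rw [PySem.Chars.splitOn, go_spec sep hsep (l.length + 1) l [] [] (by omega)]
  cases hq : sp sep l with
  | nil => exact absurd hq (sp_ne_nil _ _)
  | cons q qs => simp [List.modifyHead]

-- termination lemma for goA: stripping the last segment strictly shrinks the string
theorem strip_lt (t sep : List Char) (hsep : sep ≠ [])
    (ht' : PySem.Chars.join sep ((PySem.Chars.splitOn t sep).dropLast) ≠ []) :
    (PySem.Chars.join sep ((PySem.Chars.splitOn t sep).dropLast)).length < t.length := by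
  rw [splitOn_eq_sp _ _ hsep] at ht' ⊢
  have hne : sp sep t ≠ [] := sp_ne_nil _ _
  by_cases hd : (sp sep t).dropLast = []
  · rw [hd] at ht'; simp [PySem.Chars.join_nil] at ht'
  · have hsplit : sp sep t = (sp sep t).dropLast ++ [(sp sep t).getLast hne] :=
      (List.dropLast_append_getLast hne).symm
    have hkey : t.length = (PySem.Chars.join sep ((sp sep t).dropLast)).length
        + sep.length + ((sp sep t).getLast hne).length := by
      conv_lhs => rw [← intercalate_sp sep hsep t, hsplit]
      rw [join_append_last sep _ _ hd]
      simp [List.length_append]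
      omega
    have hlen : 0 < sep.length := List.length_pos_iff.mpr hsep
    omega

-- the A-side worker on char lists (the String port wraps it below)
def goA (t : List Char) (array : List (List Char)) (sep : List Char) : List Char :=
  match hs : PySem.Chars.split? t sep with
  | none => []        -- Python raises ValueError (empty separator); excluded by Pre_
  | some parts =>
    let t' := PySem.Chars.join sep parts.dropLast
    if t' ∈ array then
      match PySem.List.index? array t' with
      | some i => (PySem.List.pyGet? array (i : Int)).getD []
      | none => []    -- unreachable: membership holds
    else if ht' : t' = [] then []
    else goA t' array sep
termination_by t.length
decreasing_by
  have hsep : sep ≠ [] := by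
    by_contra hc
    rw [PySem.Chars.split?, if_pos (by simp [hc])] at hs
    simp at hs
  have hparts : parts = PySem.Chars.splitOn t sep := by
    rw [PySem.Chars.split?, if_neg (by simp [hsep])] at hs
    exact (Option.some_inj.mp hs).symm
  subst hparts
  exact strip_lt t sep hsep ht'

def scomp (target : String) (array : List String) (delimiter : String) : String :=
  String.ofList (goA target.toList (array.map String.toList) delimiter.toList)

-- ===== PORT B =====
-- the for-loop of Source B over range(len(parts)-1, 0, -1): first prefix join found in array wins
def goB_loop (array : List (List Char)) (sep : List Char) (parts : List (List Char)) :
    List Int → List Char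
  | [] => []
  | k :: ks =>
    let cand := PySem.Chars.join sep (PySem.List.slice parts none (some k))
    if cand ∈ array then cand else goB_loop array sep parts ks

def goB (t : List Char) (array : List (List Char)) (sep : List Char) : List Char :=
  match PySem.Chars.split? t sep with
  | none => []        -- Python raises ValueError (empty separator); excluded by Pre_
  | some parts =>
    goB_loop array sep parts (PySem.List.pyRange ((parts.length : Int) - 1) 0 (-1))

def scomp_alt (target : String) (array : List String) (delimiter : String) : String :=
  String.ofList (goB target.toList (array.map String.toList) delimiter.toList)

-- ===== PRECONDITION & SPEC =====
-- Pre_ excludes only delimiter = "": there Python's str.split raises ValueError (in A and in B).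
def Pre_scomp (target : String) (array : List String) (delimiter : String) : Prop := delimiter ≠ ""
instance (target : String) (array : List String) (delimiter : String) : Decidable (Pre_scomp target array delimiter) := by unfold Pre_scomp; infer_instance
def pvWitness_scomp : String × List String × String := ("a-b-c", ["a", "a-b"], "-")

def Spec_scomp (target : String) (array : List String) (delimiter : String) (out : String) : Prop := out = scomp_alt target array delimiter
instance (target : String) (array : List String) (delimiter : String) (out : String) : Decidable (Spec_scomp target array delimiter out) := by unfold Spec_scomp; infer_instance

-- ===== CLAIM (what is proved, stated in full; the proofs are below) =====
def Claim_equal_scomp : Prop := ∀ (target : String) (array : List String) (delimiter : String), Dom_scomp target array delimiter → Pre_scomp target array delimiter → Spec_scomp target array delimiter (scomp target array delimiter)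

-- ===== LEMMAS AND PROOFS =====

-- no occurrence of sep starts strictly inside p (p a non-final piece of a split)
def Good (sep p : List Char) : Prop := ∀ i < p.length, ¬ sep <+: (p ++ sep).drop i
-- sep does not occur in p at all
def NoInf (sep p : List Char) : Prop := ∀ i, ¬ sep <+: p.drop i

theorem prefix_append_iff_of_le {sep x r : List Char} (h : sep.length ≤ x.length) :
    sep <+: x ++ r ↔ sep <+: x := by
  constructor
  · intro hp
    have h2 : sep <+: (x ++ r).take x.length := List.prefix_take_iff.mpr ⟨hp, h⟩
    rwa [List.take_left] at h2
  · exact fun hp => hp.trans (List.prefix_append x r)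

theorem good_noInf {sep p : List Char} (hsep : sep ≠ []) (h : Good sep p) : NoInf sep p := by
  intro i hp
  by_cases hi : i < p.length
  · exact h i hi (by
      rw [List.drop_append_of_le_length (by omega)]
      exact hp.trans (List.prefix_append _ _))
  · rw [List.drop_eq_nil_of_le (by omega)] at hp
    exact hsep (List.prefix_nil.mp hp)

theorem sp_single (sep : List Char) (hsep : sep ≠ []) (p : List Char) (hp : NoInf sep p) :
    sp sep p = [p] := by
  induction p with
  | nil => exact sp_nil sep
  | cons c p' ih =>
    rw [sp_cons_neg sep c p' (by
      rintro ⟨h1, -⟩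
      exact hp 0 (by simpa using List.isPrefixOf_iff_prefix.mp h1))]
    rw [ih (fun i => by simpa using hp (i+1))]
    rfl

theorem sp_append (sep : List Char) (hsep : sep ≠ []) (p : List Char) (hp : Good sep p)
    (r : List Char) : sp sep (p ++ sep ++ r) = p :: sp sep r := by
  induction p with
  | nil =>
    simp only [List.nil_append]
    cases sep with
    | nil => exact absurd rfl hsep
    | cons s0 s' =>
      rw [show ((s0 :: s') ++ r : List Char) = s0 :: (s' ++ r) by simp]
      rw [sp_cons_pos (s0 :: s') s0 (s' ++ r)
        (by simpa using List.isPrefixOf_iff_prefix.mpr (List.prefix_append (s0 :: s') r)) (by simp)]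
      rw [show ((s0 :: (s' ++ r)).drop (s0 :: s').length : List Char) = r by simp]
  | cons c p' ih =>
    rw [show ((c :: p') ++ sep ++ r : List Char) = c :: (p' ++ sep ++ r) by simp]
    rw [sp_cons_neg sep c (p' ++ sep ++ r) (by
      rintro ⟨h1, -⟩
      have h2 : sep <+: ((c :: p') ++ sep) ++ r := by
        have := List.isPrefixOf_iff_prefix.mp h1
        simpa [List.append_assoc] using this
      have h3 : sep <+: (c :: p') ++ sep :=
        (prefix_append_iff_of_le (by simp; omega)).mp h2
      exact hp 0 (by simp) (by simpa using h3))]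
    have hp' : Good sep p' := by
      intro i hi
      have := hp (i+1) (by simp; omega)
      simpa using this
    rw [ih hp']
    rfl

theorem sp_parts (sep : List Char) (hsep : sep ≠ []) (l : List Char) :
    ∀ p ∈ (sp sep l).dropLast, Good sep p := by
  induction l using sp.induct sep with
  | case1 => simp [sp_nil]
  | case2 c rest h ih =>
    rw [sp_cons_pos sep c rest h.1 h.2]
    intro p hmem
    rw [List.dropLast_cons_of_ne_nil (sp_ne_nil _ _)] at hmem
    rcases List.mem_cons.mp hmem with rfl | hmem
    · intro i hi; simp at hi
    · exact ih p hmem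
  | case3 c rest h ih =>
    rw [sp_cons_neg sep c rest h]
    cases hq : sp sep rest with
    | nil => exact absurd hq (sp_ne_nil _ _)
    | cons q qs =>
      cases qs with
      | nil => simp [List.modifyHead]
      | cons q' qs' =>
        simp only [List.modifyHead]
        intro p hmem
        rw [List.dropLast_cons_of_ne_nil (by simp)] at hmem
        rcases List.mem_cons.mp hmem with rfl | hmem
        · -- p = c :: q
          have hrest : q ++ sep ++ PySem.Chars.join sep (q' :: qs') = rest := by
            have hsound := intercalate_sp sep hsep rest
            rw [hq, PySem.Chars.join_cons_cons] at hsound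
            exact hsound
          have hnp : ¬ sep <+: c :: rest := by
            intro hc
            exact h ⟨List.isPrefixOf_iff_prefix.mpr hc, hsep⟩
          have hq_good : Good sep q := ih q (by
            rw [hq, List.dropLast_cons_of_ne_nil (by simp)]; simp)
          intro i hi
          cases i with
          | zero =>
            intro hc
            apply hnp
            rw [show (c :: rest : List Char) = ((c :: q) ++ sep) ++ PySem.Chars.join sep (q' :: qs') by
              rw [← hrest]; simp]
            exact hc.trans (by simpa using List.prefix_append _ _)
          | succ i' =>
            have := hq_good i' (by simpa using hi)
            simpa using this
        · exact ih p (by rw [hq, List.dropLast_cons_of_ne_nil (by simp)]; exact List.mem_cons_of_mem _ hmem)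

theorem sp_last (sep : List Char) (hsep : sep ≠ []) (l : List Char) :
    ∀ p, (sp sep l).getLast? = some p → NoInf sep p := by
  induction l using sp.induct sep with
  | case1 =>
    rw [sp_nil]
    intro p hp
    simp at hp
    subst hp
    intro i hc
    rw [List.drop_nil] at hc
    exact hsep (List.prefix_nil.mp hc)
  | case2 c rest h ih =>
    rw [sp_cons_pos sep c rest h.1 h.2]
    intro p hp
    cases hq : sp sep ((c :: rest).drop sep.length) with
    | nil => exact absurd hq (sp_ne_nil _ _)
    | cons q qs =>
      rw [hq, List.getLast?_cons_cons] at hp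
      exact ih p (by rw [hq]; exact hp)
  | case3 c rest h ih =>
    rw [sp_cons_neg sep c rest h]
    cases hq : sp sep rest with
    | nil => exact absurd hq (sp_ne_nil _ _)
    | cons q qs =>
      cases qs with
      | nil =>
        simp only [List.modifyHead]
        intro p hp
        simp at hp
        subst hp
        have hrest : rest = q := by
          have hsound := intercalate_sp sep hsep rest
          rw [hq, PySem.Chars.join_singleton] at hsound
          exact hsound.symm
        have hnoq : NoInf sep q := ih q (by rw [hq]; rfl)
        intro i
        cases i with
        | zero =>
          intro hc
          rw [List.drop_zero] at hc
          rw [hrest] at h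
          exact h ⟨List.isPrefixOf_iff_prefix.mpr hc, hsep⟩
        | succ i' =>
          have := hnoq i'
          simpa using this
      | cons q' qs' =>
        simp only [List.modifyHead]
        intro p hp
        rw [List.getLast?_cons_cons] at hp
        exact ih p (by rw [hq, List.getLast?_cons_cons]; exact hp)

theorem sp_join (sep : List Char) (hsep : sep ≠ []) :
    ∀ ps : List (List Char), ps ≠ [] → (∀ p ∈ ps.dropLast, Good sep p) →
      (∀ p, ps.getLast? = some p → NoInf sep p) →
      sp sep (PySem.Chars.join sep ps) = ps := by
  intro ps
  induction ps with
  | nil => intro h; exact absurd rfl h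
  | cons p ps' ih =>
    intro _ hmid hlast
    cases ps' with
    | nil =>
      rw [PySem.Chars.join_singleton]
      exact sp_single sep hsep p (hlast p rfl)
    | cons q rest =>
      rw [PySem.Chars.join_cons_cons]
      rw [sp_append sep hsep p (hmid p (by
        rw [List.dropLast_cons_of_ne_nil (by simp)]; simp))]
      rw [ih (by simp)
        (fun p' hp' => hmid p' (by
          rw [List.dropLast_cons_of_ne_nil (by simp)]
          exact List.mem_cons_of_mem _ hp'))
        (fun p' hp' => hlast p' (by rw [List.getLast?_cons_cons]; exact hp'))]

-- array.index + array[i] returns the element equal to the key, i.e. the key itself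
theorem index_get_eq (x : List Char) (xs : List (List Char)) (h : x ∈ xs) :
    (match PySem.List.index? xs x with
     | some i => (PySem.List.pyGet? xs ((i : Nat) : Int)).getD []
     | none => []) = x := by
  induction xs with
  | nil => simp at h
  | cons y ys ih =>
    simp only [PySem.List.index?] at *
    rw [List.idxOf?_cons]
    by_cases hxy : y = x
    · subst hxy
      simp [PySem.List.pyGet?_natCast]
    · have hx : x ∈ ys := by
        rcases List.mem_cons.mp h with rfl | hm
        · exact absurd rfl hxy
        · exact hm
      have hih := ih hx
      rw [show (y == x) = false by simpa using hxy]
      simp only [Bool.false_eq_true, if_false]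
      cases hi : List.idxOf? x ys with
      | none => rw [hi] at hih; simpa using hih
      | some i =>
        rw [hi] at hih
        simp only [Option.map_some]
        simp only [PySem.List.pyGet?_natCast] at hih ⊢
        simpa using hih

-- descending range lemmas for range(n, 0, -1)
theorem pyRange_eval (a : Int) :
    PySem.List.pyRange a 0 (-1) = (List.range a.toNat).map (fun k : Nat => a + (-1) * (k : Int)) := by
  simp only [PySem.List.pyRange]
  rw [if_neg (by decide : ¬ (-1 : Int) = 0), if_neg (by decide : ¬ (0:Int) < -1)]
  by_cases h : (0:Int) < a
  · rw [if_pos h]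
    have hc : ((a - 0 + - -1 - 1) / - -1).toNat = a.toNat := by norm_num
    rw [hc]
  · rw [if_neg h, show a.toNat = 0 by omega]

theorem pyRange_desc (a : Int) (h : 0 < a) :
    PySem.List.pyRange a 0 (-1) = a :: PySem.List.pyRange (a - 1) 0 (-1) := by
  rw [pyRange_eval, pyRange_eval, show a.toNat = (a - 1).toNat + 1 by omega,
    List.range_succ_eq_map, List.map_cons, List.map_map]
  congr 1
  · omega
  · apply List.map_congr_left
    intro k _
    simp only [Function.comp]
    push_cast
    ring

theorem pyRange_desc_nil (a : Int) (h : a ≤ 0) : PySem.List.pyRange a 0 (-1) = [] := by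
  rw [pyRange_eval, show a.toNat = 0 by omega]
  simp

theorem mem_pyRange_desc {a k : Int} (h : k ∈ PySem.List.pyRange a 0 (-1)) :
    1 ≤ k ∧ k ≤ a := by
  rw [pyRange_eval] at h
  obtain ⟨j, hj, rfl⟩ := List.mem_map.mp h
  have := List.mem_range.mp hj
  omega

theorem goB_loop_congr (array : List (List Char)) (sep : List Char)
    (ps ps' : List (List Char)) :
    ∀ ks, (∀ k ∈ ks, PySem.List.slice ps none (some k) = PySem.List.slice ps' none (some k)) →
      goB_loop array sep ps ks = goB_loop array sep ps' ks := by
  intro ks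
  induction ks with
  | nil => intro _; rfl
  | cons k ks ih =>
    intro hk
    simp only [goB_loop]
    rw [hk k (by simp)]
    rw [ih (fun k' hk' => hk k' (List.mem_cons_of_mem _ hk'))]

theorem main_lemma (array : List (List Char)) (sep : List Char) (hsep : sep ≠ []) :
    ∀ (n : Nat) (ps : List (List Char)), ps.length ≤ n → ps ≠ [] →
      (∀ p ∈ ps.dropLast, Good sep p) →
      (∀ p, ps.getLast? = some p → NoInf sep p) →
      goA (PySem.Chars.join sep ps) array sep =
        goB_loop array sep ps (PySem.List.pyRange ((ps.length : Int) - 1) 0 (-1)) := by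
  intro n
  induction n with
  | zero =>
    intro ps hlen hne _ _
    cases ps with
    | nil => exact absurd rfl hne
    | cons p ps' => simp at hlen
  | succ n ih =>
    intro ps hlen hne hmid hlast
    have hsplit? : PySem.Chars.split? (PySem.Chars.join sep ps) sep = some ps := by
      rw [PySem.Chars.split?, if_neg (by simp [hsep]), splitOn_eq_sp _ _ hsep,
        sp_join sep hsep ps hne hmid hlast]
    rw [goA.eq_def]
    split
    · rename_i heq; rw [hsplit?] at heq; exact absurd heq (by simp)
    · rename_i parts heq
      rw [hsplit?] at heq
      have hparts : parts = ps := (Option.some_inj.mp heq).symm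
      subst hparts
      cases parts with
      | nil => exact absurd rfl hne
      | cons p ps' =>
        cases ps' with
        | nil =>
          -- single part: candidate is the empty string, loop body is empty
          rw [show ([p] : List (List Char)).dropLast = [] from rfl, PySem.Chars.join_nil]
          rw [show ((([p] : List (List Char)).length : Int) - 1) = 0 by simp]
          rw [pyRange_desc_nil 0 le_rfl]
          by_cases hmem : ([] : List Char) ∈ array
          · rw [if_pos hmem]
            rw [index_get_eq [] array hmem]
            rfl
          · rw [if_neg hmem]
            rw [dif_pos rfl]
            rfl
        | cons q rest =>
          set L := (p :: q :: rest).length with hL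
          have hL2 : 2 ≤ L := by simp [hL]
          have hdl_len : (p :: q :: rest).dropLast.length = L - 1 := by
            simp [hL, List.length_dropLast]
          -- the first candidate of the loop is exactly A's stripped string
          have hslice : PySem.List.slice (p :: q :: rest) none (some ((L : Int) - 1)) =
              (p :: q :: rest).dropLast := by
            rw [PySem.List.slice_to _ (by omega), List.dropLast_eq_take]
            congr 1
            simp [hL]
          rw [pyRange_desc ((L : Int) - 1) (by omega)]
          simp only [goB_loop, hslice]
          by_cases hmem : PySem.Chars.join sep (p :: q :: rest).dropLast ∈ array
          · rw [if_pos hmem, if_pos hmem]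
            exact index_get_eq _ array hmem
          · rw [if_neg hmem, if_neg hmem]
            by_cases ht0 : PySem.Chars.join sep (p :: q :: rest).dropLast = []
            · rw [dif_pos ht0]
              -- the stripped string is empty: only possible with exactly two parts
              cases rest with
              | nil =>
                rw [show ((L : Int) - 1 - 1) = 0 by simp [hL]]
                rw [pyRange_desc_nil 0 le_rfl]
                rfl
              | cons r0 rest' =>
                exfalso
                have : (p :: q :: r0 :: rest').dropLast =
                    p :: (q :: r0 :: rest').dropLast := by
                  exact List.dropLast_cons_of_ne_nil (by simp)
                rw [this] at ht0
                have h2 : (q :: r0 :: rest').dropLast = q :: (r0 :: rest').dropLast :=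
                  List.dropLast_cons_of_ne_nil (by simp)
                rw [h2, PySem.Chars.join_cons_cons] at ht0
                rcases List.append_eq_nil_iff.mp ht0 with ⟨h3, -⟩
                rcases List.append_eq_nil_iff.mp h3 with ⟨-, h4⟩
                exact hsep h4
            · rw [dif_neg ht0]
              -- A recurses on the stripped string; apply the induction hypothesis
              have hdl_ne : (p :: q :: rest).dropLast ≠ [] := by
                intro hc
                rw [hc, PySem.Chars.join_nil] at ht0
                exact ht0 rfl
              have hmid' : ∀ p' ∈ (p :: q :: rest).dropLast.dropLast, Good sep p' :=
                fun p' hp' => hmid p' ((List.dropLast_sublist _).subset hp')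
              have hlast' : ∀ p', (p :: q :: rest).dropLast.getLast? = some p' →
                  NoInf sep p' := by
                intro p' hp'
                exact good_noInf hsep (hmid p' (List.mem_of_getLast? hp'))
              have hrec := ih (p :: q :: rest).dropLast
                (by rw [hdl_len]; omega) hdl_ne hmid' hlast'
              rw [hrec]
              rw [show (((p :: q :: rest).dropLast.length : Int) - 1) = (L : Int) - 1 - 1 by
                rw [hdl_len]; omega]
              have hLr : L = rest.length + 2 := by simp [hL]
              apply goB_loop_congr
              intro k hk
              obtain ⟨hk1, hk2⟩ := mem_pyRange_desc hk
              rw [PySem.List.slice_to _ (by omega), PySem.List.slice_to _ (by omega),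
                List.dropLast_eq_take, List.take_take, min_eq_left (by
                  simp only [List.length_cons]
                  omega)]

theorem goA_eq_goB (t : List Char) (array : List (List Char)) (sep : List Char)
    (hsep : sep ≠ []) : goA t array sep = goB t array sep := by
  have hsplit? : PySem.Chars.split? t sep = some (sp sep t) := by
    rw [PySem.Chars.split?, if_neg (by simp [hsep]), splitOn_eq_sp _ _ hsep]
  rw [goB, hsplit?]
  conv_lhs => rw [← intercalate_sp sep hsep t]
  exact main_lemma array sep hsep (sp sep t).length (sp sep t) le_rfl (sp_ne_nil _ _)
    (sp_parts sep hsep t) (sp_last sep hsep t)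

-- ===== VERDICT (by name: the statement is the Claim_ definition above) =====
theorem scomp_spec : Claim_equal_scomp := by
  intro target array delimiter _ hpre
  unfold Spec_scomp scomp scomp_alt
  rw [goA_eq_goB _ _ _ (by simpa [String.toList_eq_nil_iff] using hpre)]
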